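-- pv_equiv track=rewrite | github.com/Jacob-xyb/leetcode_Jacob | python/Jx2023/2535. 数组元素和与数字和的绝对差_S_END.py | differenceOfSumV1_2
-- ===== SOURCE A (Python) =====
-- from typing import List
--
-- def differenceOfSumV1_2(nums: List[int]) -> int:
--     sum1 = 0
--     sum2 = 0
--     for num in nums:
--         sum1 += num
--         while num >= 10:
--             sum2 += num % 10
--             num //= 10
--         sum2 += num
--     return sum1 - sum2
-- ===== SOURCE B (Python) =====
-- def differenceOfSumV1_2(nums):
--     # identity: n - digitsum(n) == 9 * (n//10 + n//100 + ...); negatives and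
--     # single-digit numbers contribute 0, matching A.
--     total = 0
--     for n in nums:
--         d = 10
--         while d <= n:
--             total += 9 * (n // d)
--             d *= 10
--     return total
-- ===== Notes on version B (the rewrite author's own statement) =====
-- stated objective: alternative
-- what changed: Replaces the two accumulators with separate digit extraction (sum += num, then modulo/divide digit loop) by a single accumulator using the identity n - digitsum(n) = 9*(n//10 + n//100 + ...), so only floor-quotients are summed and no element sum or digit sum is ever formed.
import Mathlib
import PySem

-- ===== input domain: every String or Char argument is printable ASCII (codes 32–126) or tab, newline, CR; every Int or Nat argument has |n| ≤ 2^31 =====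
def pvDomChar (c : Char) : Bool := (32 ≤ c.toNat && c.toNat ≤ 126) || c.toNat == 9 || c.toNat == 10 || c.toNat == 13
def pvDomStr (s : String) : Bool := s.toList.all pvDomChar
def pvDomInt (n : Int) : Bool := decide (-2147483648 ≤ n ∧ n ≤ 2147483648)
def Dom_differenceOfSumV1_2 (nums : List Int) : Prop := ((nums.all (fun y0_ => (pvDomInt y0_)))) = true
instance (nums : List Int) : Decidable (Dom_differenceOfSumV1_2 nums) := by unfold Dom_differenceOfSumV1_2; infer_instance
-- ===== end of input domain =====

-- B uses the identity n - digitsum(n) = 9*(n//10 + n//100 + ...) with one accumulator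
-- instead of A's element-sum and modulo/divide digit-sum accumulators (alternative, same cost).
-- ===== PORT A =====
-- inner 'while num >= 10: sum2 += num % 10; num //= 10' followed by 'sum2 += num'
def pvALoop (num sum2 : Int) : Int :=
  if 10 ≤ num then
    pvALoop (PySem.Int.floordiv num 10) (sum2 + PySem.Int.mod num 10)
  else sum2 + num
termination_by num.toNat
decreasing_by
  have h : 0 ≤ PySem.Int.floordiv num 10 ∧ PySem.Int.floordiv num 10 < num := by
    rw [PySem.Int.floordiv_eq_ediv_of_pos (by omega)]; omega
  omega

def differenceOfSumV1_2 (nums : List Int) : Int :=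
  let p := nums.foldl (fun (st : Int × Int) num => (st.1 + num, pvALoop num st.2)) (0, 0)
  p.1 - p.2

-- ===== PORT B =====
-- 'while d <= n: total += 9 * (n // d); d *= 10'  (0 < d is a totality guard only; d is always positive)
def pvBLoop (n d total : Int) : Int :=
  if 0 < d ∧ d ≤ n then
    pvBLoop n (d * 10) (total + 9 * PySem.Int.floordiv n d)
  else total
termination_by (n + 1 - d).toNat
decreasing_by omega

def differenceOfSumV1_2_alt (nums : List Int) : Int :=
  nums.foldl (fun total n => pvBLoop n 10 total) 0

-- ===== PRECONDITION & SPEC =====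
def Spec_differenceOfSumV1_2 (nums : List Int) (out : Int) : Prop := out = differenceOfSumV1_2_alt nums
instance (nums : List Int) (out : Int) : Decidable (Spec_differenceOfSumV1_2 nums out) := by unfold Spec_differenceOfSumV1_2; infer_instance

-- ===== CLAIM (what is proved, stated in full; the proofs are below) =====
def Claim_equal_differenceOfSumV1_2 : Prop := ∀ (nums : List Int), Dom_differenceOfSumV1_2 nums → Spec_differenceOfSumV1_2 nums (differenceOfSumV1_2 nums)

-- ===== LEMMAS AND PROOFS =====

-- ===== VERDICT (by name: the statement is the Claim_ definition above) =====
-- digit sum exactly as A's inner loop computes it, with zero accumulator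
def pvDS (num : Int) : Int :=
  if 10 ≤ num then PySem.Int.mod num 10 + pvDS (PySem.Int.floordiv num 10)
  else num
termination_by num.toNat
decreasing_by
  have h : 0 ≤ PySem.Int.floordiv num 10 ∧ PySem.Int.floordiv num 10 < num := by
    rw [PySem.Int.floordiv_eq_ediv_of_pos (by omega)]; omega
  omega

-- B's inner loop with zero accumulator
def pvB9 (n d : Int) : Int :=
  if 0 < d ∧ d ≤ n then 9 * PySem.Int.floordiv n d + pvB9 n (d * 10)
  else 0
termination_by (n + 1 - d).toNat
decreasing_by omega

lemma pvALoop_eq (num : Int) : ∀ sum2 : Int, pvALoop num sum2 = sum2 + pvDS num := by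
  induction num using pvDS.induct with
  | case1 num h ih =>
      intro sum2
      rw [pvALoop, pvDS, if_pos h, if_pos h, ih]
      ring
  | case2 num h =>
      intro sum2
      rw [pvALoop, pvDS, if_neg h, if_neg h]

lemma pvBLoop_eq (n d : Int) : ∀ total : Int, pvBLoop n d total = total + pvB9 n d := by
  induction d using pvB9.induct (n := n) with
  | case1 d h ih =>
      intro total
      rw [pvBLoop, pvB9, if_pos h, if_pos h, ih]
      ring
  | case2 d h =>
      intro total
      rw [pvBLoop, pvB9, if_neg h, if_neg h]
      ring

lemma pvB9_step (n : Int) : ∀ e : Int, (∀ d : Int, e = d * 10 → 0 < d →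
    pvB9 n e = pvB9 (PySem.Int.floordiv n 10) d) := by
  intro e
  induction e using pvB9.induct (n := n) with
  | case1 e h ih =>
      intro d he hd
      subst he
      have h10 : (0:Int) < 10 := by omega
      have hcond : 0 < d ∧ d ≤ PySem.Int.floordiv n 10 := by
        rw [PySem.Int.floordiv_eq_ediv_of_pos h10]
        refine ⟨hd, ?_⟩
        omega
      rw [pvB9, if_pos h, ih (d * 10) rfl (by omega)]
      conv_rhs => rw [pvB9, if_pos hcond]
      congr 1
      have hcomp : PySem.Int.floordiv n (d * 10)
          = PySem.Int.floordiv (PySem.Int.floordiv n 10) d := by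
        rw [PySem.Int.floordiv_eq_ediv_of_pos (by omega : (0:Int) < d * 10),
            PySem.Int.floordiv_eq_ediv_of_pos h10,
            PySem.Int.floordiv_eq_ediv_of_pos hd,
            show d * 10 = 10 * d by ring,
            ← Int.ediv_ediv_of_nonneg (by omega : (0:Int) ≤ 10)]
      rw [hcomp]
  | case2 e h =>
      intro d he hd
      subst he
      have hnot : ¬ (0 < d ∧ d ≤ PySem.Int.floordiv n 10) := by
        rw [PySem.Int.floordiv_eq_ediv_of_pos (by omega : (0:Int) < 10)]
        omega
      rw [pvB9, if_neg h]
      rw [pvB9, if_neg hnot]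

-- per-element identity: num minus A's digit sum equals B's inner total
lemma contrib (num : Int) : num - pvDS num = pvB9 num 10 := by
  induction num using pvDS.induct with
  | case1 num h ih =>
      have hstep : pvB9 num (10 * 10) = pvB9 (PySem.Int.floordiv num 10) 10 :=
        pvB9_step num (10 * 10) 10 rfl (by omega)
      rw [pvDS, if_pos h]
      rw [pvB9, if_pos ⟨by omega, h⟩, hstep, ← ih]
      have hmul : PySem.Int.floordiv num 10 * 10 + PySem.Int.mod num 10 = num :=
        PySem.Int.floordiv_mul_add_mod num 10
      omega
  | case2 num h =>
      rw [pvDS, if_neg h]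
      rw [pvB9, if_neg (by omega)]
      omega

lemma fold_eq (nums : List Int) : ∀ s1 s2 t : Int, s1 - s2 = t →
    (nums.foldl (fun (st : Int × Int) num => (st.1 + num, pvALoop num st.2)) (s1, s2)).1
      - (nums.foldl (fun (st : Int × Int) num => (st.1 + num, pvALoop num st.2)) (s1, s2)).2
    = nums.foldl (fun total n => pvBLoop n 10 total) t := by
  induction nums with
  | nil => intro s1 s2 t ht; simpa using ht
  | cons x xs ih =>
      intro s1 s2 t ht
      simp only [List.foldl_cons]
      apply ih
      rw [pvALoop_eq, pvBLoop_eq x 10 t, ← contrib x]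
      omega

theorem differenceOfSumV1_2_spec : Claim_equal_differenceOfSumV1_2 := by
  intro nums _
  unfold Spec_differenceOfSumV1_2 differenceOfSumV1_2 differenceOfSumV1_2_alt
  exact fold_eq nums 0 0 0 (by omega)
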